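-- pv_equiv track=rewrite | github.com/atoffano/roi_des_roses | IA_demolition_man.py | position_arrive_carte
-- ===== SOURCE A (Python) =====
-- def position_arrive_carte(carte,l_roi, c_roi):  #fonction qui retourne positon eventuelle du roi si je joue la carte placée argument
--     new_l_roi = l_roi
--     new_c_roi = c_roi
--     dist_parcourue = int(carte[-1])
--     for i in range(len(carte)-1):
--         if carte[i] == 'N':
--             new_l_roi -= dist_parcourue
--         elif carte[i] == 'E':
--             new_c_roi += dist_parcourue
--         elif carte[i] == 'S':
--             new_l_roi += dist_parcourue
--         else:
--             new_c_roi -= dist_parcourue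
--     return (new_l_roi, new_c_roi)
-- ===== SOURCE B (Python) =====
-- def position_arrive_carte(carte, l_roi, c_roi):
--     dist = int(carte[-1])
--     body = carte[:-1]
--     n = body.count('N')
--     e = body.count('E')
--     s = body.count('S')
--     w = len(body) - n - e - s
--     return (l_roi + dist * (s - n), c_roi + dist * (e - w))
-- ===== Notes on version B (the rewrite author's own statement) =====
-- stated objective: simpler
-- what changed: Replaced the branch-and-mutate loop over card characters with counting N/E/S occurrences (west = complement) and one closed-form arithmetic expression.
import Mathlib
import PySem

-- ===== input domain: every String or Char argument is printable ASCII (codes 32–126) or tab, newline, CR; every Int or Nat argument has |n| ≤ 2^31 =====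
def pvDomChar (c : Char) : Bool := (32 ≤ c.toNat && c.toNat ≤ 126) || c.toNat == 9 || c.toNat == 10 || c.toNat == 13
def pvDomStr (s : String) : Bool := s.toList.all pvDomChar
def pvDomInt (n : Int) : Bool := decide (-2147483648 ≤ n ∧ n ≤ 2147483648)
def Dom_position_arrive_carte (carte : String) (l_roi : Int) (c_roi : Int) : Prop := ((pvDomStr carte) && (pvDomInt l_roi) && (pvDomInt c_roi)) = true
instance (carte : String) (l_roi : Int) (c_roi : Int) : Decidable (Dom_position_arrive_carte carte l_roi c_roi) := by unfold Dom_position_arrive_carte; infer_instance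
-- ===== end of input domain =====

-- B replaces A's branch-and-mutate loop by counting N/E/S (west = complement) and a
-- closed-form arithmetic expression; objective: simpler, same cost.

-- ===== PORT A =====
def position_arrive_carte (carte : String) (l_roi : Int) (c_roi : Int) : Int × Int :=
  let cs := carte.toList
  -- dist_parcourue = int(carte[-1]); on excluded inputs Python raises, we default to 0
  let dist := ((PySem.List.pyGet? cs (-1)).bind (fun ch => PySem.Int.ofChars? [ch])).getD 0
  (PySem.List.pyRange 0 ((cs.length : Int) - 1) 1).foldl
    (fun (st : Int × Int) i =>
      let ch := PySem.List.pyGetD cs i ' '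
      if ch = 'N' then (st.1 - dist, st.2)
      else if ch = 'E' then (st.1, st.2 + dist)
      else if ch = 'S' then (st.1 + dist, st.2)
      else (st.1, st.2 - dist))
    (l_roi, c_roi)

-- ===== PORT B =====
def position_arrive_carte_alt (carte : String) (l_roi : Int) (c_roi : Int) : Int × Int :=
  let cs := carte.toList
  let dist := ((PySem.List.pyGet? cs (-1)).bind (fun ch => PySem.Int.ofChars? [ch])).getD 0
  let body := PySem.List.slice cs none (some (-1))   -- carte[:-1]
  let n : Int := body.count 'N'
  let e : Int := body.count 'E'
  let s : Int := body.count 'S'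
  let w : Int := (body.length : Int) - n - e - s
  (l_roi + dist * (s - n), c_roi + dist * (e - w))

-- ===== PRECONDITION & SPEC =====
-- Pre_ excludes exactly the inputs on which the Python A raises (empty card: IndexError;
-- last character not a decimal digit: ValueError); B raises identically there.
def Pre_position_arrive_carte (carte : String) (l_roi : Int) (c_roi : Int) : Prop :=
  carte.toList ≠ [] ∧ PySem.Chars.isdigit (carte.toList.getLastD ' ') = true
instance (carte : String) (l_roi : Int) (c_roi : Int) : Decidable (Pre_position_arrive_carte carte l_roi c_roi) := by unfold Pre_position_arrive_carte; infer_instance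
def pvWitness_position_arrive_carte : String × Int × Int := ("NE3", 0, 0)
def Spec_position_arrive_carte (carte : String) (l_roi : Int) (c_roi : Int) (out : Int × Int) : Prop := out = position_arrive_carte_alt carte l_roi c_roi
instance (carte : String) (l_roi : Int) (c_roi : Int) (out : Int × Int) : Decidable (Spec_position_arrive_carte carte l_roi c_roi out) := by unfold Spec_position_arrive_carte; infer_instance

-- ===== CLAIM (what is proved, stated in full; the proofs are below) =====
def Claim_equal_position_arrive_carte : Prop := ∀ (carte : String) (l_roi : Int) (c_roi : Int), Dom_position_arrive_carte carte l_roi c_roi → Pre_position_arrive_carte carte l_roi c_roi → Spec_position_arrive_carte carte l_roi c_roi (position_arrive_carte carte l_roi c_roi)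

-- ===== LEMMAS AND PROOFS =====

-- the range-indexed loop over carte[:len-1] is the structural fold over cs.dropLast
lemma pv_loop_gen (cs : List Char) (f : (Int × Int) → Char → (Int × Int)) (init : Int × Int) :
    (PySem.List.pyRange 0 ((cs.length : Int) - 1) 1).foldl
      (fun st i => f st (PySem.List.pyGetD cs i ' ')) init
      = cs.dropLast.foldl f init := by
  rcases cs.eq_nil_or_concat with h | ⟨t, ch, h⟩
  · subst h; simp [PySem.List.pyRange_one_eq_nil]
  · subst h
    simp only [List.concat_eq_append, List.length_append, List.length_cons,
      List.length_nil, List.dropLast_concat]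
    have hlen : ((t.length + (0 + 1) : Nat) : Int) - 1 = (PySem.List.len t) := by simp
    rw [hlen]
    have := PySem.List.foldl_pyRange_pyGetD (xs := t) (a := 0) (d := ' ')
      (f := f) (init := init) (by omega)
    simp only [PySem.List.len_eq, Int.toNat_zero, List.drop_zero] at this ⊢
    rw [← this]
    apply PySem.List.foldl_congr_mem
    intro st i hi
    have hmem := (PySem.List.mem_pyRange_one).mp hi
    have h1 : i < ((t.length : Int)) := by
      have := hmem.2; simpa using this
    have h1' : i.toNat < t.length := by omega
    congr 1
    rw [PySem.List.pyGetD_eq_getElem (t ++ [ch]) ' ' hmem.1 (by simp; omega),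
        PySem.List.pyGetD_eq_getElem t ' ' hmem.1 (by exact_mod_cast h1)]
    exact List.getElem_append_left h1'

-- the same, with A's concrete loop body (first-order form for rewriting)
lemma pv_loop_spec (cs : List Char) (dist : Int) (init : Int × Int) :
    (PySem.List.pyRange 0 ((cs.length : Int) - 1) 1).foldl
      (fun (st : Int × Int) i =>
        if PySem.List.pyGetD cs i ' ' = 'N' then (st.1 - dist, st.2)
        else if PySem.List.pyGetD cs i ' ' = 'E' then (st.1, st.2 + dist)
        else if PySem.List.pyGetD cs i ' ' = 'S' then (st.1 + dist, st.2)
        else (st.1, st.2 - dist)) init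
      = cs.dropLast.foldl
          (fun (st : Int × Int) ch =>
            if ch = 'N' then (st.1 - dist, st.2)
            else if ch = 'E' then (st.1, st.2 + dist)
            else if ch = 'S' then (st.1 + dist, st.2)
            else (st.1, st.2 - dist)) init :=
  pv_loop_gen cs
    (fun (st : Int × Int) ch =>
      if ch = 'N' then (st.1 - dist, st.2)
      else if ch = 'E' then (st.1, st.2 + dist)
      else if ch = 'S' then (st.1 + dist, st.2)
      else (st.1, st.2 - dist)) init

-- A's fold equals B's closed form, by induction on the body
lemma pv_fold_closed (dist : Int) (body : List Char) (l c : Int) :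
    body.foldl
      (fun (st : Int × Int) ch =>
        if ch = 'N' then (st.1 - dist, st.2)
        else if ch = 'E' then (st.1, st.2 + dist)
        else if ch = 'S' then (st.1 + dist, st.2)
        else (st.1, st.2 - dist)) (l, c)
      = (l + dist * ((body.count 'S' : Int) - (body.count 'N' : Int)),
         c + dist * ((body.count 'E' : Int) -
            ((body.length : Int) - (body.count 'N' : Int) - (body.count 'E' : Int) - (body.count 'S' : Int)))) := by
  induction body generalizing l c with
  | nil => simp
  | cons ch t ih =>
    rw [List.foldl_cons]
    by_cases hN : ch = 'N'
    · subst hN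
      rw [if_pos rfl, ih, Prod.mk.injEq]
      constructor <;>
        (simp only [List.count_cons, List.length_cons, beq_iff_eq, reduceIte]; push_cast; ring)
    · by_cases hE : ch = 'E'
      · subst hE
        rw [if_neg hN, if_pos rfl, ih, Prod.mk.injEq]
        constructor <;>
          (simp only [List.count_cons, List.length_cons, beq_iff_eq, reduceIte]; push_cast; ring)
      · by_cases hS : ch = 'S'
        · subst hS
          rw [if_neg hN, if_neg hE, if_pos rfl, ih, Prod.mk.injEq]
          constructor <;>
            (simp only [List.count_cons, List.length_cons, beq_iff_eq, reduceIte]; push_cast; ring)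
        · rw [if_neg hN, if_neg hE, if_neg hS, ih, Prod.mk.injEq]
          constructor <;>
            (simp only [List.count_cons, List.length_cons, beq_iff_eq,
               if_neg hN, if_neg hE, if_neg hS]; push_cast; ring)

-- ===== VERDICT (by name: the statement is the Claim_ definition above) =====
theorem position_arrive_carte_spec : Claim_equal_position_arrive_carte := by
  intro carte l_roi c_roi _hdom _hpre
  unfold Spec_position_arrive_carte position_arrive_carte position_arrive_carte_alt
  simp only [PySem.List.slice_to_neg_one]
  rw [pv_loop_spec, pv_fold_closed]
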